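-- pv_equiv track=rewrite | github.com/RashikShahjahan/inference_autoresearch | .opencode/tools/trace_analyze.py | union_duration
-- ===== SOURCE A (Python) =====
-- def union_duration(intervals: list[tuple[int, int]]) -> tuple[int, int, list[int]]:
--     if not intervals:
--         return 0, 0, []
--     intervals.sort()
--     merged: list[tuple[int, int]] = []
--     current_start, current_end = intervals[0]
--     for start, end in intervals[1:]:
--         if start <= current_end:
--             current_end = max(current_end, end)
--         else:
--             merged.append((current_start, current_end))
--             current_start, current_end = start, end
--     merged.append((current_start, current_end))
--
--     active = sum(end - start for start, end in merged)
--     gaps = [merged[i][0] - merged[i - 1][1] for i in range(1, len(merged))]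
--     return active, len(merged), gaps
-- ===== SOURCE B (Python) =====
-- def union_duration(intervals: list[tuple[int, int]]) -> tuple[int, int, list[int]]:
--     # Two staged passes instead of A's single merge state machine: a forward
--     # pass flags block starts by comparing each start against the running
--     # maximum of all previous ends; a backward pass groups the flagged stream
--     # into blocks (so no current_start/current_end merge loop is needed).
--     intervals.sort()
--     if not intervals:
--         return 0, 0, []
--     flags = []
--     m = None
--     for s, e in intervals:
--         flags.append(m is None or s > m)
--         if m is None or e > m:
--             m = e
--     blocks = []
--     cur = None
--     for (s, e), f in zip(reversed(intervals), reversed(flags)):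
--         cur = (s, e if cur is None or e > cur[1] else cur[1])
--         if f:
--             blocks.append(cur)
--             cur = None
--     blocks.reverse()
--     active = sum(e - s for s, e in blocks)
--     gaps = [t - e for (_, e), (t, _) in zip(blocks, blocks[1:])]
--     return active, len(blocks), gaps
-- ===== Notes on version B (the rewrite author's own statement) =====
-- stated objective: alternative
-- what changed: B replaces A's single forward merge state machine (current_start/current_end loop appending to `merged`) by two staged passes: a forward pass that flags each interval that starts a new block by comparing its start against the running maximum of all previous ends, and a backward grouping pass over the flagged stream that assembles the blocks.
import Mathlib
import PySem

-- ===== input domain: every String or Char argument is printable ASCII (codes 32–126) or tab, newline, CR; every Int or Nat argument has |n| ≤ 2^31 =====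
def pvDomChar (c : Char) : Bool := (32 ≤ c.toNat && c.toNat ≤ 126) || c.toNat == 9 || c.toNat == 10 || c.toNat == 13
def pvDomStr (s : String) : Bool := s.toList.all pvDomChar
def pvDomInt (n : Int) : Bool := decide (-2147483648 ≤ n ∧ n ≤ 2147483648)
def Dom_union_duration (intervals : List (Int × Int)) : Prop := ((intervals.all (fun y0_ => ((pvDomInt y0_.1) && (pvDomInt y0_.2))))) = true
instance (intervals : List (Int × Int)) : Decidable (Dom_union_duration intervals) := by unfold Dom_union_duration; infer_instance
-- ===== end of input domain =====

-- B replaces A's single forward merge state machine by two staged passes: a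
-- forward pass that flags block starts against the running maximum of all
-- previous ends, and a backward grouping pass over the flagged stream.
-- Both sort the argument in place identically; the equivalence is about the
-- return value.

-- ===== PORT A =====
-- A: early return on [], in-place sort, merge loop building `merged`, then
-- sum / len / index comprehension over `merged`.
-- (The [] match arm is A's `if not intervals` early return: sorted [] = [].)
def union_duration (intervals : List (Int × Int)) : Int × Int × List Int :=
  match PySem.List.sorted2 intervals Prod.fst Prod.snd with
  | [] => (0, 0, [])
  | (cs0, ce0) :: rest =>
    let st := rest.foldl
      (fun (acc : List (Int × Int) × Int × Int) (p : Int × Int) =>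
        if p.1 ≤ acc.2.2 then (acc.1, acc.2.1, max acc.2.2 p.2)
        else (acc.1 ++ [(acc.2.1, acc.2.2)], p.1, p.2))
      ([], cs0, ce0)
    let merged := st.1 ++ [(st.2.1, st.2.2)]
    let active := merged.foldl (fun a p => a + (p.2 - p.1)) 0
    let gaps := (PySem.List.pyRange 1 (merged.length : Int) 1).map
      (fun i => (PySem.List.pyGetD merged i (0, 0)).1 - (PySem.List.pyGetD merged (i - 1) (0, 0)).2)
    (active, (merged.length : Int), gaps)

-- ===== PORT B =====
-- B (Source B): sort, then
--   pass 1: flags[i] = (m is None or s > m) with m the running max of ends;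
--   pass 2: fold over zip(reversed(intervals), reversed(flags)) grouping the
--           flagged stream into blocks (appended right-to-left, then reversed);
--   finally sum / len / pairwise-zip gaps over `blocks`.
-- `blocks[1:]` (nonnegative index slice) is `blocks.tail`.
-- pvFlagStep / pvGrpStep are the bodies of Source B's two for-loops.
def pvFlagStep (acc : List Bool × Option Int) (p : Int × Int) : List Bool × Option Int :=
  (acc.1 ++ [match acc.2 with | none => true | some m => decide (m < p.1)],
   match acc.2 with | none => some p.2 | some m => if m < p.2 then some p.2 else some m)

def pvGrpStep (acc : List (Int × Int) × Option (Int × Int)) (q : (Int × Int) × Bool) :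
    List (Int × Int) × Option (Int × Int) :=
  let cur : Int × Int :=
    (q.1.1, match acc.2 with | none => q.1.2 | some c => if c.2 < q.1.2 then q.1.2 else c.2)
  if q.2 then (acc.1 ++ [cur], none) else (acc.1, some cur)

def union_duration_alt (intervals : List (Int × Int)) : Int × Int × List Int :=
  match PySem.List.sorted2 intervals Prod.fst Prod.snd with
  | [] => (0, 0, [])
  | p0 :: rest =>
    let L := p0 :: rest
    let fm := L.foldl pvFlagStep ([], none)
    let st := (L.reverse.zip fm.1.reverse).foldl pvGrpStep ([], none)
    let blocks := st.1.reverse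
    let active := blocks.foldl (fun a p => a + (p.2 - p.1)) 0
    let gaps := (blocks.zip blocks.tail).map (fun q => q.2.1 - q.1.2)
    (active, (blocks.length : Int), gaps)

-- ===== PRECONDITION & SPEC =====
def Spec_union_duration (intervals : List (Int × Int)) (out : Int × Int × List Int) : Prop := out = union_duration_alt intervals
instance (intervals : List (Int × Int)) (out : Int × Int × List Int) : Decidable (Spec_union_duration intervals out) := by unfold Spec_union_duration; infer_instance

-- ===== CLAIM (what is proved, stated in full; the proofs are below) =====
def Claim_equal_union_duration : Prop := ∀ (intervals : List (Int × Int)), Dom_union_duration intervals → Spec_union_duration intervals (union_duration intervals)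

-- ===== LEMMAS AND PROOFS =====

-- The merged-block list A's loop computes from a start state (cs, ce).
def pvBlocks (cs ce : Int) : List (Int × Int) → List (Int × Int)
  | [] => [(cs, ce)]
  | (s, e) :: t => if s ≤ ce then pvBlocks cs (max ce e) t else (cs, ce) :: pvBlocks s e t

def pvSumLen (l : List (Int × Int)) : Int := (l.map (fun p => p.2 - p.1)).sum

def pvGapsAdj : List (Int × Int) → List Int
  | (_, b) :: (c, d) :: t => (c - b) :: pvGapsAdj ((c, d) :: t)
  | _ => []

-- B's flag stream relative to a running maximum m of the ends seen so far.
def pvFlagsM (m : Int) : List (Int × Int) → List Bool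
  | [] => []
  | p :: t => decide (m < p.1) :: pvFlagsM (max m p.2) t

-- B's block recursion driven by the running maximum m instead of A's current_end.
def pvBlocksM (cs ce m : Int) : List (Int × Int) → List (Int × Int)
  | [] => [(cs, ce)]
  | p :: t => if m < p.1 then (cs, ce) :: pvBlocksM p.1 p.2 (max m p.2) t
              else pvBlocksM cs (max ce p.2) (max m p.2) t

-- The result of B's backward grouping fold, fused with the flag stream.
def pvGS (m : Int) : List (Int × Int) → List (Int × Int) × Option (Int × Int)
  | [] => ([], none)
  | p :: t =>
    let r := pvGS (max m p.2) t
    let cur : Int × Int := (p.1, match r.2 with | none => p.2 | some c => max c.2 p.2)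
    if m < p.1 then (r.1 ++ [cur], none) else (r.1, some cur)

lemma pvmax_if (m e : Int) : (if m < e then e else m) = max m e := by
  rcases lt_or_ge m e with h | h
  · simp [h, max_eq_right h.le]
  · simp [not_lt.2 h, max_eq_left h]

-- A's merge loop: the final merged list (accumulator ++ [current block]).
lemma pvA_fold (rest : List (Int × Int)) : ∀ (m : List (Int × Int)) (cs ce : Int),
    (fun (st : List (Int × Int) × Int × Int) => st.1 ++ [(st.2.1, st.2.2)])
      (rest.foldl
        (fun (acc : List (Int × Int) × Int × Int) (p : Int × Int) =>
          if p.1 ≤ acc.2.2 then (acc.1, acc.2.1, max acc.2.2 p.2)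
          else (acc.1 ++ [(acc.2.1, acc.2.2)], p.1, p.2)) (m, cs, ce))
    = m ++ pvBlocks cs ce rest := by
  induction rest with
  | nil => intro m cs ce; simp [pvBlocks]
  | cons p t ih =>
    intro m cs ce
    simp only [List.foldl_cons, pvBlocks]
    by_cases h : p.1 ≤ ce
    · simpa [h] using ih m cs (max ce p.2)
    · simpa [h] using ih (m ++ [(cs, ce)]) p.1 p.2

lemma pvSumLen_cons (x : Int × Int) (l : List (Int × Int)) :
    pvSumLen (x :: l) = (x.2 - x.1) + pvSumLen l := by
  simp [pvSumLen]

lemma pvGapsAdj_cons (b : Int × Int) (x : Int × Int) (l : List (Int × Int)) :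
    pvGapsAdj (b :: x :: l) = (x.1 - b.2) :: pvGapsAdj (x :: l) := rfl

-- A's gap comprehension over indices equals the structural adjacent gaps.
lemma pvGaps_nat (l : List (Int × Int)) :
    (List.range (l.length - 1)).map
      (fun k => (l.getD (k + 1) (0, 0)).1 - (l.getD k (0, 0)).2) = pvGapsAdj l := by
  induction l with
  | nil => simp [pvGapsAdj]
  | cons x t ih =>
    cases t with
    | nil => simp [pvGapsAdj]
    | cons y t' =>
      rw [pvGapsAdj_cons]
      have hlen : (x :: y :: t').length - 1 = (y :: t').length - 1 + 1 := by
        simp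
      rw [hlen, List.range_succ_eq_map, List.map_cons, List.map_map]
      refine congrArg₂ _ (by simp) ?_
      rw [← ih]
      exact List.map_congr_left (fun k _ => by simp [Function.comp])

lemma pvGaps_range (l : List (Int × Int)) :
    (PySem.List.pyRange 1 (l.length : Int) 1).map
      (fun i => (PySem.List.pyGetD l i (0, 0)).1 - (PySem.List.pyGetD l (i - 1) (0, 0)).2)
    = pvGapsAdj l := by
  rw [PySem.List.pyRange_one, List.map_map, ← pvGaps_nat]
  have hlen : ((l.length : Int) - 1).toNat = l.length - 1 := by omega
  rw [hlen]
  refine List.map_congr_left (fun k _ => ?_)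
  simp only [Function.comp_apply]
  rw [show (1 : Int) + (k : Int) = ((k + 1 : Nat) : Int) by push_cast; ring]
  rw [show ((k + 1 : Nat) : Int) - 1 = ((k : Nat) : Int) by push_cast; ring]
  rw [PySem.List.pyGetD_natCast, PySem.List.pyGetD_natCast]

-- A's sum over the merged list equals pvSumLen (shared by B's identical sum pass).
lemma pvSum_fold (l : List (Int × Int)) :
    l.foldl (fun a p => a + (p.2 - p.1)) 0 = pvSumLen l := by
  have : ∀ (a : Int), l.foldl (fun a p => a + (p.2 - p.1)) a = a + pvSumLen l := by
    induction l with
    | nil => intro a; simp [pvSumLen]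
    | cons x t ih => intro a; simp only [List.foldl_cons]; rw [ih, pvSumLen_cons]; ring
  simpa using this 0

-- B's zip-with-tail gap pass equals the structural adjacent gaps.
lemma pvGaps_zip (l : List (Int × Int)) :
    (l.zip l.tail).map (fun q => q.2.1 - q.1.2) = pvGapsAdj l := by
  induction l with
  | nil => rfl
  | cons x t ih =>
    cases t with
    | nil => rfl
    | cons y t' => rw [pvGapsAdj_cons, ← ih]; rfl

lemma pvFlagsM_length (m : Int) (t : List (Int × Int)) :
    (pvFlagsM m t).length = t.length := by
  induction t generalizing m with
  | nil => rfl
  | cons p t ih => simp [pvFlagsM, ih]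

-- B's first pass: the flag fold produces the flag stream pvFlagsM.
lemma pvFlags_fold (t : List (Int × Int)) : ∀ (fl : List Bool) (m : Int),
    t.foldl pvFlagStep (fl, some m)
    = (fl ++ pvFlagsM m t, some (t.foldl (fun a p => max a p.2) m)) := by
  induction t with
  | nil => intro fl m; simp [pvFlagsM]
  | cons p t ih =>
    intro fl m
    simp only [List.foldl_cons, pvFlagsM, pvFlagStep]
    have h2 : (if m < p.2 then some p.2 else some m : Option Int) = some (max m p.2) := by
      rcases lt_or_ge m p.2 with h | h
      · simp [h, max_eq_right h.le]
      · simp [not_lt.2 h, max_eq_left h]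
    rw [h2, ih]
    simp

-- `reversed` of a same-length zip is the zip of the `reversed`s.
lemma pvZip_reverse {α β : Type} (l1 : List α) : ∀ (l2 : List β), l1.length = l2.length →
    l1.reverse.zip l2.reverse = (l1.zip l2).reverse := by
  induction l1 with
  | nil => intro l2 h; simp
  | cons x t ih =>
    intro l2 h
    cases l2 with
    | nil => simp at h
    | cons y t2 =>
      simp only [List.length_cons, Nat.add_right_cancel_iff] at h
      simp only [List.reverse_cons, List.zip_cons_cons]
      rw [List.zip_append (by simp [h]), ih t2 h]
      simp

-- B's second pass (a foldr after reversal) fused with the flag stream is pvGS.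
lemma pvGrp_foldr (t : List (Int × Int)) : ∀ (m : Int),
    (t.zip (pvFlagsM m t)).foldr
      (fun (q : (Int × Int) × Bool) (acc : List (Int × Int) × Option (Int × Int)) => pvGrpStep acc q)
      ([], none)
    = pvGS m t := by
  induction t with
  | nil => intro m; rfl
  | cons p t ih =>
    intro m
    simp only [pvFlagsM, List.zip_cons_cons, List.foldr_cons]
    rw [ih (max m p.2)]
    simp only [pvGS, pvGrpStep]
    rcases hgs : (pvGS (max m p.2) t).2 with _ | c
    · by_cases h : m < p.1 <;> simp [h]
    · by_cases h : m < p.1 <;> simp [h, pvmax_if]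

-- The mathematical heart: on a start-sorted tail, B's running-maximum grouping
-- pvGS produces exactly A's merge blocks pvBlocks.  Invariant: m is the max of
-- ce and the ends of all already-closed blocks, each of which lies below cs.
lemma pvGS_blocks (t : List (Int × Int)) : ∀ (cs ce m : Int),
    (m = ce ∨ (ce ≤ m ∧ m < cs)) →
    (∀ p ∈ t, cs ≤ p.1) →
    t.Pairwise (fun a b => a.1 ≤ b.1) →
    ((pvGS m t).1 ++ [(cs, match (pvGS m t).2 with | none => ce | some c => max c.2 ce)]).reverse
      = pvBlocks cs ce t := by
  induction t with
  | nil => intro cs ce m _ _ _; simp [pvGS, pvBlocks]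
  | cons p t ih =>
    intro cs ce m hinv hcs hpw
    have hcsp : cs ≤ p.1 := hcs p (by simp)
    have hcem : ce ≤ m := by rcases hinv with h | h <;> omega
    rw [List.pairwise_cons] at hpw
    by_cases h : m < p.1
    · -- new block starts at p
      have hA : ¬ p.1 ≤ ce := by omega
      have hinv' : max m p.2 = p.2 ∨ (p.2 ≤ max m p.2 ∧ max m p.2 < p.1) := by
        rcases le_total m p.2 with hh | hh
        · left; exact max_eq_right hh
        · right; rw [max_eq_left hh]; omega
      have := ih p.1 p.2 (max m p.2) hinv' hpw.1 hpw.2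
      simp only [pvGS, h, if_true, pvBlocks, hA, if_false]
      rw [List.append_assoc]
      simp only [List.reverse_append, List.reverse_cons, List.reverse_nil,
        List.nil_append, List.cons_append] at this ⊢
      rw [this]
    · -- p merges into the current block
      have hm : m = ce := by
        rcases hinv with hh | hh
        · exact hh
        · exact absurd (lt_of_lt_of_le hh.2 hcsp) h
      have hA : p.1 ≤ ce := by omega
      subst hm
      have := ih cs (max m p.2) (max m p.2) (Or.inl rfl) (fun q hq => hcs q (by simp [hq])) hpw.2
      simp only [pvGS, h, if_false, pvBlocks, hA, if_true]
      rw [← this]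
      rcases hgs : (pvGS (max m p.2) t).2 with _ | c
      · simp [max_comm]
      · rw [max_assoc, max_comm p.2 m]

-- Insertion with Python's lexicographic `before` keeps the starts ordered.
lemma pvIns_pairwise (x : Int × Int) (ys : List (Int × Int))
    (h : ys.Pairwise (fun a b : Int × Int => a.1 ≤ b.1)) :
    (PySem.List.insertBy
        (fun a b : Int × Int => decide (a.1 < b.1) || (!decide (b.1 < a.1) && decide (a.2 < b.2)))
        x ys).Pairwise (fun a b : Int × Int => a.1 ≤ b.1) := by
  induction ys with
  | nil => simp [PySem.List.insertBy]
  | cons y ys ih =>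
    rw [List.pairwise_cons] at h
    simp only [PySem.List.insertBy]
    by_cases hb : (decide (x.1 < y.1) || (!decide (y.1 < x.1) && decide (x.2 < y.2))) = true
    · rw [if_pos hb]
      have hxy : x.1 ≤ y.1 := by
        simp only [Bool.or_eq_true, Bool.and_eq_true, decide_eq_true_eq, Bool.not_eq_true',
          decide_eq_false_iff_not] at hb
        rcases hb with hh | hh
        · exact hh.le
        · omega
      refine List.pairwise_cons.2 ⟨?_, List.pairwise_cons.2 ⟨h.1, h.2⟩⟩
      intro z hz
      rcases List.mem_cons.1 hz with rfl | hz
      · exact hxy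
      · exact le_trans hxy (h.1 z hz)
    · rw [if_neg hb]
      have hyx : y.1 ≤ x.1 := by
        simp only [Bool.or_eq_true, Bool.and_eq_true, decide_eq_true_eq, Bool.not_eq_true',
          decide_eq_false_iff_not, not_or, not_and] at hb
        omega
      refine List.pairwise_cons.2 ⟨?_, ih h.2⟩
      intro z hz
      rw [PySem.List.insertBy_mem_iff] at hz
      rcases hz with rfl | hz
      · exact hyx
      · exact h.1 z hz

-- Python's tuple sort leaves the starts pairwise nondecreasing.
lemma pvSorted2_pairwise (xs : List (Int × Int)) :
    (PySem.List.sorted2 xs Prod.fst Prod.snd).Pairwise (fun a b : Int × Int => a.1 ≤ b.1) := by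
  show (xs.foldl _ []).Pairwise _
  have : ∀ (l : List (Int × Int)) (acc : List (Int × Int)),
      acc.Pairwise (fun a b : Int × Int => a.1 ≤ b.1) →
      (l.foldl (fun acc x => PySem.List.insertBy
          (fun a b : Int × Int => decide (a.1 < b.1) || (!decide (b.1 < a.1) && decide (a.2 < b.2)))
          x acc) acc).Pairwise (fun a b : Int × Int => a.1 ≤ b.1) := by
    intro l
    induction l with
    | nil => intro acc h; exact h
    | cons x t ih => intro acc h; exact ih _ (pvIns_pairwise x acc h)
  exact this xs [] (by simp)

-- ===== VERDICT (by name: the statement is the Claim_ definition above) =====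
theorem union_duration_spec : Claim_equal_union_duration := by
  intro intervals _
  unfold Spec_union_duration union_duration union_duration_alt
  cases hs : PySem.List.sorted2 intervals Prod.fst Prod.snd with
  | nil => rfl
  | cons p rest =>
    obtain ⟨cs0, ce0⟩ := p
    have hpw : ((cs0, ce0) :: rest).Pairwise (fun a b : Int × Int => a.1 ≤ b.1) := by
      have := pvSorted2_pairwise intervals
      rwa [hs] at this
    rw [List.pairwise_cons] at hpw
    simp only
    -- A's side in terms of pvBlocks
    have hA := pvA_fold rest [] cs0 ce0
    simp only [List.nil_append] at hA
    -- B's side: flags, reversal, grouping, then pvGS_blocks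
    have hflags := pvFlags_fold rest [true] ce0
    simp only [List.singleton_append] at hflags
    have hmain := pvGS_blocks rest cs0 ce0 ce0 (Or.inl rfl) hpw.1 hpw.2
    rw [hA]
    have hstep1 :
        (((cs0, ce0) :: rest).foldl pvFlagStep ([], none)).1 = true :: pvFlagsM ce0 rest := by
      simp only [List.foldl_cons]
      rw [show pvFlagStep ([], none) (cs0, ce0) = ([true], some ce0) from rfl, hflags]
    rw [hstep1]
    have hlen : ((cs0, ce0) :: rest).length = (true :: pvFlagsM ce0 rest).length := by
      simp [pvFlagsM_length]
    -- evaluate B's grouping fold to the merged-block list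
    have hst : (((cs0, ce0) :: rest).reverse.zip (true :: pvFlagsM ce0 rest).reverse).foldl
        pvGrpStep ([], none)
        = ((pvBlocks cs0 ce0 rest).reverse, (none : Option (Int × Int))) := by
      rw [pvZip_reverse _ _ hlen, List.foldl_reverse (f := pvGrpStep),
        show ((cs0, ce0) :: rest).zip (true :: pvFlagsM ce0 rest)
          = ((cs0, ce0), true) :: rest.zip (pvFlagsM ce0 rest) from rfl]
      simp only [List.foldr_cons]
      rw [pvGrp_foldr rest ce0]
      rcases hgs : (pvGS ce0 rest).2 with _ | c
      · rw [show pvGrpStep (pvGS ce0 rest) ((cs0, ce0), true)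
            = ((pvGS ce0 rest).1 ++ [(cs0, ce0)], none) from by simp [pvGrpStep, hgs]]
        rw [hgs] at hmain
        simp only at hmain
        rw [← hmain, List.reverse_reverse]
      · rw [show pvGrpStep (pvGS ce0 rest) ((cs0, ce0), true)
            = ((pvGS ce0 rest).1 ++ [(cs0, if c.2 < ce0 then ce0 else c.2)], none) from by
              simp [pvGrpStep, hgs]]
        rw [hgs] at hmain
        simp only [pvmax_if] at hmain ⊢
        rw [← hmain, List.reverse_reverse]
    rw [hst]
    simp only [List.reverse_reverse]
    rw [pvSum_fold, pvGaps_range, pvGaps_zip]
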